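-- pv_equiv track=rewrite | github.com/sigridjineth/algorithm_log | Programmers/2021_1_dev_matching/다단계.py | solution
-- ===== SOURCE A (Python) =====
-- import collections
--
-- def solution(enroll, referral, seller, amount):
--     answer = []
--     enroll_graph = collections.defaultdict(str)
--     revenue_graph = collections.defaultdict(int)
--     amount = [element * 100 for element in amount]
--     def revenue_calculator(seller, amount):
--         if (seller == "-"):
--             return
--         # 종료 조건
--         if (amount <= 0):
--             return
--         # amount // 10은 원단위 절사 계산하는 방법이다!
--         revenue_graph[seller] = revenue_graph[seller] + amount - (amount // 10)
--         revenue_calculator(enroll_graph[seller], (amount // 10))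
--     for i in range(len(enroll)):
--         enroll_graph[enroll[i]] = referral[i]
--     for j in range(len(seller)):
--         revenue_calculator(seller[j], amount[j])
--     for k in range(len(enroll)):
--         answer.append(revenue_graph[enroll[k]])
--     return answer
-- ===== SOURCE B (Python) =====
-- import collections
--
-- def solution(enroll, referral, seller, amount):
--     parent = dict(zip(enroll, referral))
--     credits = collections.Counter()
--     for name, amt in zip(seller, amount):
--         amt *= 100
--         while name != "-" and amt > 0:
--             credits[name] += amt - amt // 10
--             amt //= 10
--             name = parent.get(name, "")
--     return [credits[e] for e in enroll]
-- ===== Notes on version B (the rewrite author's own statement) =====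
-- stated objective: idiomatic
-- what changed: Replaces the recursive revenue_calculator that mutates two defaultdicts with an iterative while-loop walking up the parent chain, builds the referral map with dict(zip(...)) instead of an index loop, accumulates in a Counter, and returns a list comprehension instead of an append loop.
import Mathlib
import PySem

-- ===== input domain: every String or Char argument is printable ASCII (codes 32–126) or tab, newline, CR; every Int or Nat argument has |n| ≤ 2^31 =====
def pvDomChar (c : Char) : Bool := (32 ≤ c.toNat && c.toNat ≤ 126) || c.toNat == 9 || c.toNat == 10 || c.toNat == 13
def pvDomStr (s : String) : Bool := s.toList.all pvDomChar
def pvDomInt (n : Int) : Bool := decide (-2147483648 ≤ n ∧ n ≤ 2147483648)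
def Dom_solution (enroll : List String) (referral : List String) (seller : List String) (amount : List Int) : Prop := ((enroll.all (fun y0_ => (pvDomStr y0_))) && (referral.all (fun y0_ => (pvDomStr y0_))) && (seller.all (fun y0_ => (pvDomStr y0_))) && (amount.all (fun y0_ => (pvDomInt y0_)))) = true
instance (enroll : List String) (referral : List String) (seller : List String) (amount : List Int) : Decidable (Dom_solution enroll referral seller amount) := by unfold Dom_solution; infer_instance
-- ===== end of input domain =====

-- B replaces A's recursive revenue_calculator (two mutated defaultdicts, three index loops)
-- with dict(zip(...)), an iterative chain walk into a Counter and a list comprehension;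
-- same cost, proved to return the same list on all inputs where A returns (Pre_).

-- ===== PORT A =====
-- recursive revenue_calculator: mutates revenue_graph (threaded here), reads enroll_graph
def pvRevCalcA (eg : PySem.Dict String String) (rg : PySem.Dict String Int)
    (seller : String) (amount : Int) : PySem.Dict String Int :=
  if seller = "-" then rg
  else if amount ≤ 0 then rg
  else
    pvRevCalcA eg
      (rg.insert seller (rg.getD seller 0 + amount - PySem.Int.floordiv amount 10))
      (eg.getD seller "") (PySem.Int.floordiv amount 10)
termination_by amount.toNat
decreasing_by
  rename_i _ h2
  rw [PySem.Int.floordiv_eq_ediv_of_pos (by omega : (0:Int) < 10)]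
  omega

def solution (enroll : List String) (referral : List String) (seller : List String) (amount : List Int) : List Int :=
  let eg := (PySem.List.pyRange 0 (enroll.length : Int)).foldl
      (fun d i => d.insert (PySem.List.pyGetD enroll i "") (PySem.List.pyGetD referral i "")) PySem.Dict.empty
  let amount2 := amount.map (fun element => element * 100)
  let rg := (PySem.List.pyRange 0 (seller.length : Int)).foldl
      (fun d j => pvRevCalcA eg d (PySem.List.pyGetD seller j "") (PySem.List.pyGetD amount2 j 0)) PySem.Dict.empty
  (PySem.List.pyRange 0 (enroll.length : Int)).foldl
      (fun answer k => answer ++ [rg.getD (PySem.List.pyGetD enroll k "") 0]) []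

-- ===== PORT B =====
-- iterative walk up the parent chain (Source B's while loop)
def pvWalk (parent : PySem.Dict String String) (credits : PySem.Dict String Int)
    (name : String) (amt : Int) : PySem.Dict String Int :=
  if name ≠ "-" ∧ 0 < amt then
    pvWalk parent
      (credits.insert name (credits.getD name 0 + (amt - PySem.Int.floordiv amt 10)))
      (parent.getD name "") (PySem.Int.floordiv amt 10)
  else credits
termination_by amt.toNat
decreasing_by
  rename_i h
  rw [PySem.Int.floordiv_eq_ediv_of_pos (by omega : (0:Int) < 10)]
  omega

def solution_alt (enroll : List String) (referral : List String) (seller : List String) (amount : List Int) : List Int :=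
  let parent := (enroll.zip referral).foldl (fun d p => d.insert p.1 p.2) PySem.Dict.empty
  let credits := (seller.zip amount).foldl (fun d p => pvWalk parent d p.1 (p.2 * 100)) PySem.Dict.empty
  enroll.map (fun e => credits.getD e 0)

-- ===== PRECONDITION & SPEC =====
-- A indexes referral[i] for i < len(enroll) and amount[j] for j < len(seller):
-- Pre_ excludes exactly the shorter-parallel-list inputs, where A raises IndexError.
def Pre_solution (enroll : List String) (referral : List String) (seller : List String) (amount : List Int) : Prop :=
  enroll.length ≤ referral.length ∧ seller.length ≤ amount.length
instance (enroll : List String) (referral : List String) (seller : List String) (amount : List Int) : Decidable (Pre_solution enroll referral seller amount) := by unfold Pre_solution; infer_instance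

def pvWitness_solution : List String × List String × List String × List Int :=
  (["john", "mary"], ["-", "john"], ["mary"], [12])

def Spec_solution (enroll : List String) (referral : List String) (seller : List String) (amount : List Int) (out : List Int) : Prop := out = solution_alt enroll referral seller amount
instance (enroll : List String) (referral : List String) (seller : List String) (amount : List Int) (out : List Int) : Decidable (Spec_solution enroll referral seller amount out) := by unfold Spec_solution; infer_instance

-- ===== CLAIM (what is proved, stated in full; the proofs are below) =====
def Claim_equal_solution : Prop := ∀ (enroll : List String) (referral : List String) (seller : List String) (amount : List Int), Dom_solution enroll referral seller amount → Pre_solution enroll referral seller amount → Spec_solution enroll referral seller amount (solution enroll referral seller amount)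


-- ===== LEMMAS AND PROOFS =====

-- the recursive calculator and the iterative walk compute the same dict
theorem revCalc_eq_walk (eg : PySem.Dict String String) :
    ∀ (n : Nat) (a : Int), a.toNat ≤ n → ∀ (rg : PySem.Dict String Int) (s : String),
      pvRevCalcA eg rg s a = pvWalk eg rg s a := by
  intro n
  induction n with
  | zero =>
      intro a ha rg s
      have h2 : a ≤ 0 := by omega
      have hnc : ¬ (s ≠ "-" ∧ 0 < a) := by intro h; omega
      rw [pvRevCalcA, pvWalk, if_neg hnc]
      split_ifs <;> rfl
  | succ n ih =>
      intro a ha rg s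
      rw [pvRevCalcA, pvWalk]
      by_cases h1 : s = "-"
      · simp [h1]
      · by_cases h2 : a ≤ 0
        · have hnc : ¬ (s ≠ "-" ∧ 0 < a) := by intro h; omega
          rw [if_neg h1, if_pos h2, if_neg hnc]
        · have hc : s ≠ "-" ∧ 0 < a := ⟨h1, by omega⟩
          rw [if_neg h1, if_neg h2, if_pos hc, add_sub_assoc]
          apply ih
          rw [PySem.Int.floordiv_eq_ediv_of_pos (by omega : (0:Int) < 10)]
          omega

theorem solution_spec_aux (enroll referral seller : List String) (amount : List Int)
    (h1 : enroll.length ≤ referral.length) (h2 : seller.length ≤ amount.length) :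
    solution enroll referral seller amount = solution_alt enroll referral seller amount := by
  simp only [solution, solution_alt]
  -- the graph-building loop over indices equals the fold over the zip
  have hz1 : (enroll.zip referral).length = enroll.length := by
    simp [List.length_zip]; omega
  have heg :
      (PySem.List.pyRange 0 (enroll.length : Int)).foldl
          (fun d i => d.insert (PySem.List.pyGetD enroll i "") (PySem.List.pyGetD referral i "")) PySem.Dict.empty
        = (enroll.zip referral).foldl (fun d p => d.insert p.1 p.2) PySem.Dict.empty := by
    have := PySem.List.foldl_pyRange_zero_pyGetD (enroll.zip referral) ("", "")
        (fun (d : PySem.Dict String String) p => d.insert p.1 p.2) PySem.Dict.empty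
    rw [← this]
    simp only [PySem.List.len_eq, hz1]
    apply PySem.List.foldl_congr_mem
    intro acc x hx
    rw [PySem.List.mem_pyRange_one] at hx
    have hlt : x.toNat < (enroll.zip referral).length := by omega
    rw [PySem.List.pyGetD_eq_getElem _ _ hx.1 (by omega),
        PySem.List.pyGetD_eq_getElem _ _ hx.1 (by omega),
        PySem.List.pyGetD_eq_getElem _ _ hx.1 (by rw [hz1] at hlt; omega; ),
        List.getElem_zip]
  rw [heg]
  -- the revenue loop over indices equals the fold over the zip (by revCalc_eq_walk pointwise)
  have hz2 : (seller.zip amount).length = seller.length := by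
    simp [List.length_zip]; omega
  have hrg :
      (PySem.List.pyRange 0 (seller.length : Int)).foldl
          (fun d j => pvRevCalcA ((enroll.zip referral).foldl (fun d p => d.insert p.1 p.2) PySem.Dict.empty) d
            (PySem.List.pyGetD seller j "") (PySem.List.pyGetD (amount.map (fun element => element * 100)) j 0))
          PySem.Dict.empty
        = (seller.zip amount).foldl
            (fun d p => pvWalk ((enroll.zip referral).foldl (fun d p => d.insert p.1 p.2) PySem.Dict.empty) d p.1 (p.2 * 100))
            PySem.Dict.empty := by
    have := PySem.List.foldl_pyRange_zero_pyGetD (seller.zip amount) ("", (0:Int))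
        (fun (d : PySem.Dict String Int) p =>
          pvWalk ((enroll.zip referral).foldl (fun d p => d.insert p.1 p.2) PySem.Dict.empty) d p.1 (p.2 * 100))
        PySem.Dict.empty
    rw [← this]
    simp only [PySem.List.len_eq, hz2]
    apply PySem.List.foldl_congr_mem
    intro acc x hx
    rw [PySem.List.mem_pyRange_one] at hx
    have hlt : x.toNat < (seller.zip amount).length := by omega
    have hmap := PySem.List.pyGetD_map (fun element => element * 100) amount x 0
    norm_num at hmap
    rw [hmap,
        PySem.List.pyGetD_eq_getElem _ _ hx.1 (by omega),
        PySem.List.pyGetD_eq_getElem _ _ hx.1 (by rw [hz2] at hlt; omega),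
        PySem.List.pyGetD_eq_getElem _ _ hx.1 (by rw [hz2] at hlt; omega),
        List.getElem_zip]
    exact revCalc_eq_walk _ ((amount[x.toNat] * 100).toNat) _ (le_refl _) acc _
  rw [hrg]
  -- the answer-collection loop equals the map
  have := PySem.List.foldl_pyRange_zero_pyGetD enroll ""
      (fun (answer : List Int) e => answer ++
        [PySem.Dict.getD ((seller.zip amount).foldl
            (fun d p => pvWalk ((enroll.zip referral).foldl (fun d p => d.insert p.1 p.2) PySem.Dict.empty) d p.1 (p.2 * 100))
            PySem.Dict.empty) e 0]) []
  simp only [PySem.List.len_eq] at this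
  rw [this, PySem.List.foldl_append_singleton_eq_map]
  simp

-- ===== VERDICT (by name: the statement is the Claim_ definition above) =====
theorem solution_spec : Claim_equal_solution := by
  intro enroll referral seller amount _ hpre
  unfold Spec_solution
  exact solution_spec_aux enroll referral seller amount hpre.1 hpre.2
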